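-- pv_equiv track=rewrite | github.com/NikitaKotvitskiy/CA-Nono-Solver | nonogen.py | get_column_clues
-- ===== SOURCE A (Python) =====
-- def get_column_clues(matrix):
--     """
--     Calculates the consecutive filled block lengths for each column.
--     """
--     clues = []
--     rows = len(matrix)
--     cols = len(matrix[0]) if rows > 0 else 0
--
--     for col in range(cols):
--         col_clues = []
--         count = 0
--         for row in range(rows):
--             if matrix[row][col]:
--                 count += 1
--             else:
--                 if count:
--                     col_clues.append(count)
--                     count = 0
--         # End of column: if it ended with a filled block, add it
--         if count:
--             col_clues.append(count)
--         clues.append(col_clues)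
--     return clues
-- ===== SOURCE B (Python) =====
-- def _block_lengths(cells):
--     # Recursive run-splitting: strip a falsy cell, or split off a whole
--     # truthy run at once and recurse on the remainder.
--     if not cells:
--         return []
--     if not cells[0]:
--         return _block_lengths(cells[1:])
--     run = next((i for i, v in enumerate(cells) if not v), len(cells))
--     return [run] + _block_lengths(cells[run:])
--
--
-- def get_column_clues(matrix):
--     width = len(matrix[0]) if matrix else 0
--     return [_block_lengths([row[c] for row in matrix]) for c in range(width)]
-- ===== Notes on version B (the rewrite author's own statement) =====
-- stated objective: alternative
-- what changed: Replaces the per-cell count/reset/flush state machine over row indices with a recursive run-splitting pass: each column list is built once, then whole truthy runs are split off and emitted by recursion instead of maintaining a counter and flushing it.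
import Mathlib
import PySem

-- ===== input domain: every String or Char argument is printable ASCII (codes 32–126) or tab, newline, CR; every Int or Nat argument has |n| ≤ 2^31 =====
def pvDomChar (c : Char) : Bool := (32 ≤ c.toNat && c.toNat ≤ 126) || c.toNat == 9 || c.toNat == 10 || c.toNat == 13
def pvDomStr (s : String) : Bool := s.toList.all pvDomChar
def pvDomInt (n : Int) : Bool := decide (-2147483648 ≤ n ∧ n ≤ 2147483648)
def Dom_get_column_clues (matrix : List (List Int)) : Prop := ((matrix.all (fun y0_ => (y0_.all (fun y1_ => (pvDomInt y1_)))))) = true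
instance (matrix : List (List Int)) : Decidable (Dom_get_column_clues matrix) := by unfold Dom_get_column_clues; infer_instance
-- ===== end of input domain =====

-- B restructures A's per-cell count/reset/flush state machine into a recursive
-- run-splitting pass over each column list; same cost, different decomposition.

-- ===== PORT A =====
def get_column_clues (matrix : List (List Int)) : List (List Int) :=
  let rows : Int := matrix.length
  let cols : Int := if rows > 0 then ((PySem.List.pyGetD matrix 0 []).length : Int) else 0
  (PySem.List.pyRange 0 cols 1).foldl (fun clues col =>
    let st := (PySem.List.pyRange 0 rows 1).foldl
      (fun (s : List Int × Int) row =>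
        if PySem.List.pyGetD (PySem.List.pyGetD matrix row []) col 0 ≠ 0 then
          (s.1, s.2 + 1)
        else if s.2 ≠ 0 then (s.1 ++ [s.2], (0 : Int)) else s)
      ([], (0 : Int))
    clues ++ [if st.2 ≠ 0 then st.1 ++ [st.2] else st.1]) []

-- ===== PORT B =====
def pvBlockLengths : List Int → List Int
  | [] => []
  | v :: rest =>
    if v = 0 then pvBlockLengths rest
    else
      let t := rest.takeWhile (fun x => decide (x ≠ 0))
      (1 + (t.length : Int)) :: pvBlockLengths (rest.drop t.length)
termination_by cells => cells.length
decreasing_by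
  · simp
  · simp [List.length_drop]

def get_column_clues_alt (matrix : List (List Int)) : List (List Int) :=
  let width : Int := match matrix with | [] => 0 | r :: _ => (r.length : Int)
  (PySem.List.pyRange 0 width 1).map (fun c =>
    pvBlockLengths (matrix.map (fun row => PySem.List.pyGetD row c 0)))

-- ===== PRECONDITION & SPEC =====
-- A raises IndexError when some row is shorter than the first row; Pre_ admits
-- exactly the inputs on which A returns normally.
def Pre_get_column_clues (matrix : List (List Int)) : Prop :=
  ∀ row ∈ matrix, (matrix.headD []).length ≤ row.length
instance (matrix : List (List Int)) : Decidable (Pre_get_column_clues matrix) := by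
  unfold Pre_get_column_clues; infer_instance
def pvWitness_get_column_clues : List (List Int) := [[1, 0], [0, 1], [1, 1]]

def Spec_get_column_clues (matrix : List (List Int)) (out : List (List Int)) : Prop := out = get_column_clues_alt matrix
instance (matrix : List (List Int)) (out : List (List Int)) : Decidable (Spec_get_column_clues matrix out) := by unfold Spec_get_column_clues; infer_instance

-- ===== CLAIM (what is proved, stated in full; the proofs are below) =====
def Claim_equal_get_column_clues : Prop := ∀ (matrix : List (List Int)), Dom_get_column_clues matrix → Pre_get_column_clues matrix → Spec_get_column_clues matrix (get_column_clues matrix)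

-- ===== LEMMAS AND PROOFS =====

-- A's per-cell step and end-of-column flush, abstracted over the cell value.
def pvStep (s : List Int × Int) (v : Int) : List Int × Int :=
  if v ≠ 0 then (s.1, s.2 + 1)
  else if s.2 ≠ 0 then (s.1 ++ [s.2], (0 : Int)) else s

def pvFlush (st : List Int × Int) : List Int :=
  if st.2 ≠ 0 then st.1 ++ [st.2] else st.1

theorem pvBlockLengths_nil : pvBlockLengths [] = [] := by
  rw [pvBlockLengths.eq_def]

theorem pvBlockLengths_cons (v : Int) (rest : List Int) :
    pvBlockLengths (v :: rest) =
      if v = 0 then pvBlockLengths rest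
      else (1 + ((rest.takeWhile (fun x => decide (x ≠ 0))).length : Int)) ::
        pvBlockLengths (rest.drop (rest.takeWhile (fun x => decide (x ≠ 0))).length) := by
  rw [pvBlockLengths.eq_def]

theorem pvDrop_takeWhile (p : Int → Bool) (l : List Int) :
    l.drop (l.takeWhile p).length = l.dropWhile p := by
  induction l with
  | nil => simp
  | cons x xs ih =>
    by_cases h : p x <;> simp [h, ih]

theorem pvDropWhile_head_false (p : Int → Bool) (l : List Int) (w : Int) (d' : List Int)
    (h : l.dropWhile p = w :: d') : p w = false := by
  induction l with
  | nil => simp at h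
  | cons x xs ih =>
    by_cases hx : p x
    · rw [List.dropWhile_cons, if_pos hx] at h
      exact ih h
    · rw [List.dropWhile_cons, if_neg hx] at h
      cases h
      simpa using hx

theorem pvStep_run (t : List Int) (h : ∀ x ∈ t, x ≠ 0) (acc : List Int) (c : Int) :
    t.foldl pvStep (acc, c) = (acc, c + t.length) := by
  induction t generalizing c with
  | nil => simp
  | cons x xs ih =>
    have hx : x ≠ 0 := h x (by simp)
    simp only [List.foldl_cons, pvStep, if_pos hx]
    rw [ih (fun y hy => h y (by simp [hy]))]
    simp; ring

theorem pvMachine_eq (n : Nat) : ∀ cs : List Int, cs.length ≤ n → ∀ acc : List Int,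
    pvFlush (cs.foldl pvStep (acc, 0)) = acc ++ pvBlockLengths cs := by
  induction n with
  | zero =>
    intro cs h acc
    have : cs = [] := List.eq_nil_of_length_eq_zero (Nat.le_zero.mp h)
    subst this; simp [pvFlush, pvBlockLengths_nil]
  | succ n ih =>
    intro cs h acc
    match cs with
    | [] => simp [pvFlush, pvBlockLengths_nil]
    | v :: rest =>
      by_cases hv : v = 0
      · subst hv
        simp only [List.foldl_cons, pvStep]
        norm_num
        rw [pvBlockLengths_cons, if_pos rfl]
        exact ih rest (by simpa using h) acc
      · set t := rest.takeWhile (fun x => decide (x ≠ 0)) with ht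
        set d := rest.drop t.length with hd
        have hdw : d = rest.dropWhile (fun x => decide (x ≠ 0)) := by
          rw [hd, ht, pvDrop_takeWhile]
        have hrest : t ++ d = rest := by
          rw [hdw, ht]; exact List.takeWhile_append_dropWhile
        have htall : ∀ x ∈ t, x ≠ 0 := by
          intro x hx
          have := List.mem_takeWhile_imp hx
          simpa using this
        have hsplit : v :: rest = (v :: t) ++ d := by simp [← hrest]
        have hlen2 : rest.length ≤ n := by simpa using h
        have hrun : (v :: t).foldl pvStep (acc, 0) = (acc, 1 + (t.length : Int)) := by
          simp only [List.foldl_cons, pvStep, if_pos hv]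
          rw [pvStep_run t htall acc (0 + 1)]
          norm_num
        rw [pvBlockLengths_cons, if_neg hv, ← ht, ← hd]
        conv_lhs => rw [hsplit, List.foldl_append, hrun]
        have hcount : (1 : Int) + (t.length : Int) ≠ 0 := by positivity
        have hdlen : d.length ≤ n := by
          have h1 : rest.length ≤ n := by simpa using h
          have h2 : d.length ≤ rest.length := by rw [hd]; simp
          omega
        match d, hdw with
        | [], _ =>
          simp [pvFlush, if_pos hcount, pvBlockLengths_nil]
        | w :: d', hdw =>
          have hw : w = 0 := by
            have := pvDropWhile_head_false (fun x => decide (x ≠ 0)) rest w d' hdw.symm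
            simpa using this
          subst hw
          simp only [List.foldl_cons, pvStep, if_neg (by simp : ¬ ((0:Int) ≠ 0)), if_pos hcount]
          rw [ih d' (by simp at hdlen; omega) (acc ++ [1 + (t.length : Int)])]
          rw [pvBlockLengths_cons]
          simp

theorem pvFlush_eq (st : List Int × Int) :
    (if st.2 ≠ 0 then st.1 ++ [st.2] else st.1) = pvFlush st := rfl

theorem pvInner_eq (matrix : List (List Int)) (col : Int) :
    (PySem.List.pyRange 0 (matrix.length : Int) 1).foldl
      (fun (s : List Int × Int) row =>
        if PySem.List.pyGetD (PySem.List.pyGetD matrix row []) col 0 ≠ 0 then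
          (s.1, s.2 + 1)
        else if s.2 ≠ 0 then (s.1 ++ [s.2], (0 : Int)) else s)
      ([], (0 : Int))
    = (matrix.map (fun row => PySem.List.pyGetD row col 0)).foldl pvStep ([], (0 : Int)) := by
  rw [List.foldl_map]
  exact PySem.List.foldl_pyRange_zero_pyGetD' matrix []
    (fun s r => pvStep s (PySem.List.pyGetD r col 0)) ([], (0 : Int))

-- ===== VERDICT (by name: the statement is the Claim_ definition above) =====
theorem get_column_clues_spec : Claim_equal_get_column_clues := by
  unfold Claim_equal_get_column_clues
  intro matrix _ _
  unfold Spec_get_column_clues get_column_clues get_column_clues_alt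
  cases matrix with
  | nil => simp
  | cons r m =>
    simp only [List.length_cons]
    rw [if_pos (by positivity), PySem.List.pyGetD_zero_cons]
    rw [PySem.List.foldl_append_singleton_eq_map]
    simp only [List.nil_append]
    apply List.map_congr_left
    intro col _
    rw [show ((m.length + 1 : Nat) : Int) = (((r :: m).length : Nat) : Int) by simp]
    rw [pvInner_eq (r :: m) col]
    rw [pvFlush_eq]
    have hm := pvMachine_eq (((r :: m).map (fun row => PySem.List.pyGetD row col 0)).length)
      ((r :: m).map (fun row => PySem.List.pyGetD row col 0)) le_rfl []
    simpa using hm
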